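-- pv_equiv track=rewrite | github.com/waltad/ProjectPatterns | banana.py | banana2
-- ===== SOURCE A (Python) =====
-- import itertools
--
-- def banana2(s):
--     n_lst = [_ for _ in range(len(s))]
--     ch_lst = [ch for ch in s]
--     r = len(s) - 6
--     output = []
--     for x in itertools.combinations(n_lst, r):
--         copy_ch = ch_lst.copy()
--         for i in x:
--             copy_ch[i] = '-'
--         if "".join(copy_ch).replace('-', '') == 'banana':
--             output.append("".join(copy_ch))
--     return output
-- ===== SOURCE B (Python) =====
-- def banana2(s):
--     # DP-style recursion over positions: at each index either dash the char or,
--     # if it matches the next needed letter of "banana", keep it; dash branch first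
--     # reproduces A's combination (removed-index lexicographic) order.
--     target = "banana"
--     n = len(s)
--
--     def rec(i, j):
--         if (6 - j) > (n - i):       # not enough characters left to finish "banana"
--             return []
--         if i == n:                  # here j == 6 is forced by the guard
--             return [""]
--         res = ['-' + t for t in rec(i + 1, j)]
--         if j < 6 and s[i] == target[j]:
--             res += [s[i] + t for t in rec(i + 1, j + 1)]
--         return res
--
--     return rec(0, 0)
-- ===== Notes on version B (the rewrite author's own statement) =====
-- stated objective: faster
-- what changed: Instead of enumerating all C(n, n-6) index combinations and checking each masked string, B directly enumerates the subsequence matches of 'banana' by a pruned recursion over positions (dash branch first, which reproduces A's combination order).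
import Mathlib
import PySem

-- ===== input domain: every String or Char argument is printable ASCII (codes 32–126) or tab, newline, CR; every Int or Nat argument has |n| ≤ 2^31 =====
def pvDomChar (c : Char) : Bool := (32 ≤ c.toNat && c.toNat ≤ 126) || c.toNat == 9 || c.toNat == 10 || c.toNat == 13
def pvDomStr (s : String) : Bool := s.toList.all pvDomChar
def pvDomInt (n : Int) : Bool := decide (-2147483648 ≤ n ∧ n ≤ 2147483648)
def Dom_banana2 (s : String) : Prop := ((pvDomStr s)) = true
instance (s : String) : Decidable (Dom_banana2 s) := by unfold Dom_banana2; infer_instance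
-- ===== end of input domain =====

-- B replaces A's enumeration of all C(n, n-6) removed-index combinations by a pruned
-- recursion over positions that only explores subsequence matches of "banana" (objective: faster).

-- ===== PORT A =====
def banana2 (s : String) : List String :=
  let n_lst := List.range s.toList.length                  -- [_ for _ in range(len(s))]
  let ch_lst := s.toList                                   -- [ch for ch in s]
  let r : Int := (s.toList.length : Int) - 6               -- r = len(s) - 6
  -- itertools.combinations raises ValueError when r < 0 (excluded by Pre_banana2); [] here
  let combs := if r < 0 then [] else PySem.List.combinations n_lst r.toNat
  combs.foldl (fun output x =>
    let copy_ch := x.foldl (fun a i => a.set i '-') ch_lst -- for i in x: copy_ch[i] = '-'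
    if PySem.Str.replace (String.ofList copy_ch) "-" "" == "banana"
    then output ++ [String.ofList copy_ch]                 -- "".join(copy_ch) = String.ofList copy_ch
    else output) []

-- ===== PORT B =====
def bananaRec (cs pat : List Char) : List (List Char) :=
  if pat.length > cs.length then []                        -- prune: not enough characters left
  else
    match cs, pat with
    | [], _ => [[]]                                        -- i == n (pat = [] forced by the guard)
    | c :: cs', pat =>
      ((bananaRec cs' pat).map (fun t => '-' :: t)) ++     -- dash branch first (A's order)
      (match pat with
       | [] => []
       | p :: ps => if c = p then (bananaRec cs' ps).map (fun t => c :: t) else [])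
termination_by structural cs

def banana2_alt (s : String) : List String :=
  (bananaRec s.toList "banana".toList).map String.ofList

-- ===== PRECONDITION & SPEC =====
-- Pre_ excludes exactly the strings shorter than 6 characters, on which A raises
-- ValueError (itertools.combinations with negative r).
def Pre_banana2 (s : String) : Prop := 6 ≤ s.toList.length
instance (s : String) : Decidable (Pre_banana2 s) := by unfold Pre_banana2; infer_instance

def pvWitness_banana2 : String := "banana!"

def Spec_banana2 (s : String) (out : List String) : Prop := out = banana2_alt s
instance (s : String) (out : List String) : Decidable (Spec_banana2 s out) := by unfold Spec_banana2; infer_instance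

-- ===== CLAIM (what is proved, stated in full; the proofs are below) =====
def Claim_equal_banana2 : Prop := ∀ (s : String), Dom_banana2 s → Pre_banana2 s → Spec_banana2 s (banana2 s)

-- ===== LEMMAS AND PROOFS =====

-- masked copy of cs: positions listed in x replaced by '-'
def maskM (cs : List Char) (x : List Nat) : List Char :=
  cs.mapIdx (fun i c => if i ∈ x then '-' else c)

-- all ways of replacing exactly r characters of cs by '-'
def dashings : List Char → Nat → List (List Char)
  | cs, 0 => [cs]
  | [], _ + 1 => []
  | c :: cs, r + 1 =>
      ((dashings cs r).map (fun t => '-' :: t)) ++ ((dashings cs (r + 1)).map (fun t => c :: t))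

-- keep m iff its non-dash characters spell pat
def chk (pat m : List Char) : Option (List Char) :=
  if m.filter (fun c => c != '-') = pat then some m else none

lemma mask_nil (cs : List Char) : maskM cs [] = cs := by
  apply List.ext_getElem <;> simp [maskM]

lemma foldl_set_eq_mask (x : List Nat) (cs : List Char) :
    x.foldl (fun a i => a.set i '-') cs = maskM cs x := by
  induction x generalizing cs with
  | nil => simp [mask_nil]
  | cons i x ih =>
    simp only [List.foldl_cons, ih]
    apply List.ext_getElem
    · simp [maskM]
    · intro j h1 h2
      simp only [maskM, List.getElem_mapIdx, List.getElem_set, List.mem_cons]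
      by_cases hx : j ∈ x
      · simp [hx]
      · by_cases hij : j = i
        · simp_all [maskM]
        · simp_all [maskM, Ne.symm hij]

lemma mask_succ (c : Char) (cs : List Char) (x : List Nat) :
    maskM (c :: cs) (x.map Nat.succ) = c :: maskM cs x := by
  apply List.ext_getElem
  · simp [maskM]
  · intro j h1 h2
    cases j with
    | zero => simp [maskM, List.mapIdx_cons]
    | succ j => simp [maskM, List.getElem_mapIdx, Nat.succ_eq_add_one]

lemma mask_zero_succ (c : Char) (cs : List Char) (x : List Nat) :
    maskM (c :: cs) (0 :: x.map Nat.succ) = '-' :: maskM cs x := by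
  apply List.ext_getElem
  · simp [maskM]
  · intro j h1 h2
    cases j with
    | zero => simp [maskM, List.mapIdx_cons]
    | succ j => simp [maskM, List.getElem_mapIdx, Nat.succ_eq_add_one]

lemma combos_mask (cs : List Char) (r : Nat) :
    (PySem.List.combinations (List.range cs.length) r).map (maskM cs) = dashings cs r := by
  induction cs generalizing r with
  | nil =>
    cases r with
    | zero => simp [PySem.List.combinations_zero, dashings, mask_nil]
    | succ r => simp [PySem.List.combinations_nil_succ, dashings]
  | cons c cs ih =>
    cases r with
    | zero => simp [PySem.List.combinations_zero, dashings, mask_nil]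
    | succ r =>
      rw [List.length_cons, List.range_succ_eq_map, PySem.List.combinations_cons_succ,
        PySem.List.combinations_map, PySem.List.combinations_map]
      rw [List.map_append, List.map_map, List.map_map, dashings]
      congr 1
      · rw [← ih r, List.map_map]
        apply List.map_congr_left
        intro y hy
        simp [Function.comp, mask_zero_succ]
      · rw [← ih (r + 1), List.map_map, List.map_map]
        apply List.map_congr_left
        intro y hy
        simp [Function.comp, mask_succ]

lemma dashings_nil_of_lt (cs : List Char) (r : Nat) (h : cs.length < r) : dashings cs r = [] := by
  induction cs generalizing r with
  | nil => cases r with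
    | zero => simp at h
    | succ r => rfl
  | cons c cs ih =>
    cases r with
    | zero => simp at h
    | succ r =>
      simp only [dashings, List.append_eq_nil_iff, List.map_eq_nil_iff]
      simp only [List.length_cons] at h
      exact ⟨ih r (by omega), ih (r + 1) (by omega)⟩

lemma filter_dashings_len (cs : List Char) (r : Nat) (m : List Char) (hm : m ∈ dashings cs r) :
    (m.filter (fun c => c != '-')).length + r ≤ cs.length := by
  induction cs generalizing r m with
  | nil =>
    cases r with
    | zero => simp only [dashings, List.mem_singleton] at hm; subst hm; simp
    | succ r => simp [dashings] at hm
  | cons c cs ih =>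
    cases r with
    | zero =>
      simp only [dashings, List.mem_singleton] at hm; subst hm
      have := List.length_filter_le (fun c => c != '-') (c :: cs)
      simpa using this
    | succ r =>
      simp only [dashings, List.mem_append, List.mem_map] at hm
      rcases hm with ⟨t, ht, rfl⟩ | ⟨t, ht, rfl⟩
      · have := ih r t ht
        simp only [List.filter_cons]
        norm_num
        omega
      · have := ih (r + 1) t ht
        simp only [List.filter_cons, List.length_cons]
        by_cases hc : c = '-'
        · simp [hc]; omega
        · simp [hc]; omega

lemma replace_go_dash (fuel : Nat) (m acc : List Char) (h : m.length ≤ fuel) :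
    PySem.Chars.replace.go ['-'] [] fuel m acc = acc.reverse ++ m.filter (fun c => c != '-') := by
  induction fuel generalizing m acc with
  | zero =>
    have : m = [] := List.eq_nil_of_length_eq_zero (by omega)
    subst this
    simp [PySem.Chars.replace.go]
  | succ fuel ih =>
    cases m with
    | nil => simp [PySem.Chars.replace.go]
    | cons c t =>
      simp only [PySem.Chars.replace.go]
      by_cases hc : c = '-'
      · subst hc
        rw [if_pos (by simp [List.isPrefixOf])]
        simp only [List.length_cons] at h
        rw [ih _ _ (by simpa using h)]
        simp
      · rw [if_neg (by simp [List.isPrefixOf, Ne.symm hc])]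
        simp only [List.length_cons] at h
        rw [ih _ _ (by omega)]
        simp [hc]

lemma replace_dash (m : List Char) :
    PySem.Chars.replace m ['-'] [] = m.filter (fun c => c != '-') := by
  rw [PySem.Chars.replace]
  simp only [List.isEmpty_cons]
  simpa using replace_go_dash m.length m [] le_rfl

lemma chk_dash (pat m : List Char) :
    chk pat ('-' :: m) = Option.map (fun t => '-' :: t) (chk pat m) := by
  simp [chk, apply_ite]

lemma chk_keep (c : Char) (ps m : List Char) (hc : c ≠ '-') :
    chk (c :: ps) (c :: m) = Option.map (fun t => c :: t) (chk ps m) := by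
  simp [chk, hc, apply_ite]

lemma main_lemma (cs pat : List Char) (hd : '-' ∉ pat) (hl : pat.length ≤ cs.length) :
    (dashings cs (cs.length - pat.length)).filterMap (chk pat) = bananaRec cs pat := by
  induction cs generalizing pat with
  | nil =>
    have hp : pat = [] := List.eq_nil_of_length_eq_zero (by simpa using hl)
    subst hp
    simp [dashings, chk, bananaRec]
  | cons c cs' ih =>
    rw [bananaRec.eq_def, if_neg (by omega)]
    dsimp only
    by_cases heq : pat.length = (c :: cs').length
    -- r = 0 : the only dashing is the string itself
    · rw [heq, Nat.sub_self]
      cases pat with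
      | nil => simp [List.length_cons] at heq
      | cons p ps =>
        have hps : ps.length = cs'.length := by simpa using heq
        have hdash2 : bananaRec cs' (p :: ps) = [] := by
          rw [bananaRec.eq_def, if_pos (by simp [hps])]
        rw [hdash2]
        have hp : p ≠ '-' := fun h => hd (by simp [h])
        have hps' : '-' ∉ ps := fun h => hd (by simp [h])
        dsimp only
        rw [← ih ps hps' (le_of_eq hps), hps, Nat.sub_self]
        simp only [dashings, List.filterMap_cons, List.filterMap_nil, List.map_nil,
          List.nil_append]
        by_cases hc : c = '-'
        · subst hc
          have hne : chk (p :: ps) ('-' :: cs') = none := by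
            rw [chk, if_neg]
            simp only [List.filter_cons, bne_self_eq_false, Bool.false_eq_true, if_false]
            intro hcontra
            have hlen : (List.filter (fun c => c != '-') cs').length ≤ cs'.length :=
              List.length_filter_le _ _
            have : (List.filter (fun c => c != '-') cs').length = ps.length + 1 := by
              rw [hcontra]; simp
            omega
          simp [hne, Ne.symm hp]
        · by_cases hcp : c = p
          · subst hcp
            rw [if_pos rfl, chk_keep c ps cs' hc, chk]
            split_ifs with h2 <;> simp
          · rw [if_neg hcp]
            have hne : chk (p :: ps) (c :: cs') = none := by
              rw [chk, if_neg]
              simp [hc, hcp]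
            simp [hne]
    -- r = r' + 1 : dash branch and keep branch
    · have hlt : pat.length < (c :: cs').length := lt_of_le_of_ne hl heq
      have hle' : pat.length ≤ cs'.length := by
        simp only [List.length_cons] at hlt; omega
      have hr : (c :: cs').length - pat.length = (cs'.length - pat.length) + 1 := by
        simp only [List.length_cons]; omega
      rw [hr, dashings, List.filterMap_append, List.filterMap_map, List.filterMap_map]
      congr 1
      · rw [← ih pat hd hle', List.map_filterMap]
        apply List.filterMap_congr
        intro m hm
        simp [Function.comp, chk_dash]
      · cases pat with
        | nil =>
          rw [dashings_nil_of_lt cs' _ (by simp)]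
          simp
        | cons p ps =>
          have hp : p ≠ '-' := fun h => hd (by simp [h])
          have hps' : '-' ∉ ps := fun h => hd (by simp [h])
          dsimp only
          by_cases hcp : c = p
          · subst hcp
            rw [if_pos rfl]
            have hr2 : cs'.length - ps.length = cs'.length - (c :: ps).length + 1 := by
              simp only [List.length_cons] at hle' ⊢
              omega
            rw [← ih ps hps' (by simp only [List.length_cons] at hle'; omega), hr2,
              List.map_filterMap]
            apply List.filterMap_congr
            intro m hm
            simp [Function.comp, chk_keep c ps m hp]
          · rw [if_neg hcp, List.filterMap_eq_nil_iff]
            intro m hm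
            simp only [Function.comp, chk, List.filter_cons]
            by_cases hc : c = '-'
            · subst hc
              simp only [bne_self_eq_false, Bool.false_eq_true, if_false]
              rw [if_neg]
              intro hcontra
              have h1 := filter_dashings_len cs' _ m hm
              have : (List.filter (fun c => c != '-') m).length = ps.length + 1 := by
                rw [hcontra]; simp
              simp only [List.length_cons] at hle' h1 this
              omega
            · simp only [bne_iff_ne, ne_eq, hc, not_false_iff, if_true]
              rw [if_neg]
              simp [hcp]

lemma filterMap_chk (pat : List Char) (l : List (List Char)) :
    l.filterMap (chk pat) = l.filter (fun m => m.filter (fun c => c != '-') == pat) := by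
  induction l with
  | nil => rfl
  | cons m l ih =>
    rw [List.filterMap_cons, List.filter_cons, chk]
    by_cases h : List.filter (fun c => c != '-') m = pat
    · rw [if_pos h, if_pos (by simp [h]), ih]
    · rw [if_neg h, if_neg (by simp [h]), ih]

lemma cond_eq (m : List Char) :
    (PySem.Str.replace (String.ofList m) "-" "" == "banana")
      = (m.filter (fun c => c != '-') == "banana".toList) := by
  have key : PySem.Str.replace (String.ofList m) "-" "" = "banana"
      ↔ m.filter (fun c => c != '-') = "banana".toList := by
    rw [String.ext_iff, PySem.Str.toList_replace, String.toList_ofList,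
      show ("-" : String).toList = ['-'] from rfl, show ("" : String).toList = [] from rfl,
      replace_dash m]
  rw [Bool.eq_iff_iff]
  simpa only [beq_iff_eq] using key

lemma banana2_eq_alt (s : String) (hpre : 6 ≤ s.toList.length) :
    banana2 s = banana2_alt s := by
  unfold banana2 banana2_alt
  dsimp only
  have hneg : ¬ ((s.toList.length : Int) - 6 < 0) := by omega
  have htn : ((s.toList.length : Int) - 6).toNat = s.toList.length - 6 := by omega
  rw [if_neg hneg, htn]
  rw [PySem.List.foldl_append_if
    (fun x => PySem.Str.replace (String.ofList (List.foldl (fun a i => a.set i '-') s.toList x)) "-" "" == "banana")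
    (fun x => String.ofList (List.foldl (fun a i => a.set i '-') s.toList x))]
  rw [List.nil_append]
  have hb : ("banana".toList).length = 6 := rfl
  rw [← main_lemma s.toList "banana".toList (by decide) (by omega), hb]
  rw [← combos_mask s.toList (s.toList.length - 6), filterMap_chk, List.filter_map,
    List.map_map]
  congr 1
  all_goals first
    | (funext x; simp only [Function.comp, foldl_set_eq_mask])
    | (apply List.filter_congr; intro x hx;
       simp only [Function.comp, foldl_set_eq_mask, cond_eq])

-- ===== VERDICT (by name: the statement is the Claim_ definition above) =====
theorem banana2_spec : Claim_equal_banana2 := by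
  intro s _ hpre
  unfold Spec_banana2
  exact banana2_eq_alt s hpre
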